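-- pv_equiv track=rewrite | github.com/CDCgov/phoenix | bin/q30.py | qual_stat
-- ===== SOURCE A (Python) =====
-- def qual_stat(qstr):
--     q20 = 0
--     q30 = 0
--     for q in qstr:
--         qual = ord(chr(q)) - 33
--         # qual = ord(q) - 33 #python2 version
--         if qual >= 30:
--             q30 += 1
--             q20 += 1
--         elif qual >= 20:
--             q20 += 1
--     return q20, q30
-- ===== SOURCE B (Python) =====
-- def qual_stat(qstr):
--     # Histogram pass: tally each distinct quality value once, then apply the
--     # thresholds per distinct value instead of per base.
--     counts = {}
--     for q in qstr:
--         counts[q] = counts.get(q, 0) + 1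
--     q20 = 0
--     q30 = 0
--     for v, c in counts.items():
--         qual = ord(chr(v)) - 33
--         if qual >= 20:
--             q20 += c
--         if qual >= 30:
--             q30 += c
--     return q20, q30
-- ===== Notes on version B (the rewrite author's own statement) =====
-- stated objective: alternative
-- what changed: B builds a frequency table of the quality values in one tallying pass and then applies the two thresholds once per distinct value (adding the value's multiplicity), instead of A's per-element inline threshold tests.
-- outside the precondition, e.g. on qual_stat([-1]): A raises ValueError, B raises ValueError
import Mathlib
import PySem

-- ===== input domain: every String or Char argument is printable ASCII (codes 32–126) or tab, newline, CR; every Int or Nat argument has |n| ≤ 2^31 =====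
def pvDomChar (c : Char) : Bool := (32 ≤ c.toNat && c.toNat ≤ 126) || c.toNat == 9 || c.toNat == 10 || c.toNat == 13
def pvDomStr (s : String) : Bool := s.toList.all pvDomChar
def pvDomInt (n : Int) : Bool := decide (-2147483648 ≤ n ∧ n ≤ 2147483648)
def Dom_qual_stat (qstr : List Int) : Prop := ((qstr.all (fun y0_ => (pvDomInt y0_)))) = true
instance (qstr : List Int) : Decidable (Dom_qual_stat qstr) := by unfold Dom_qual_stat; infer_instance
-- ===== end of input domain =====

-- B tallies the quality values into a frequency table first and then applies the two
-- thresholds once per DISTINCT value (adding its multiplicity) — an alternative,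
-- histogram-shaped second pass instead of A's per-element threshold tests.

-- ===== PORT A =====
-- ord(chr(q)) = q exactly for 0 ≤ q ≤ 0x10FFFF (guaranteed by Pre_qual_stat; chr raises outside).
def qual_stat (qstr : List Int) : Int × Int :=
  qstr.foldl (fun s q =>
    let qual := q - 33
    if qual ≥ 30 then (s.1 + 1, s.2 + 1)
    else if qual ≥ 20 then (s.1 + 1, s.2)
    else s) (0, 0)

-- ===== PORT B =====
-- counts[q] = counts.get(q, 0) + 1 over qstr, then a loop over counts.items().
def qual_stat_alt (qstr : List Int) : Int × Int :=
  let counts : PySem.Dict Int Int :=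
    qstr.foldl (fun d q => d.insert q (d.getD q 0 + 1)) PySem.Dict.empty
  counts.items.foldl (fun s vc =>
    let qual := vc.1 - 33       -- ord(chr(v)) = v on Pre_qual_stat, as in port A
    let q20 := if qual ≥ 20 then s.1 + vc.2 else s.1
    let q30 := if qual ≥ 30 then s.2 + vc.2 else s.2
    (q20, q30)) (0, 0)

-- ===== PRECONDITION & SPEC =====
-- Pre_ excludes exactly the inputs where chr(q) raises (negative q: ValueError; q > 0x10FFFF,
-- still inside Dom's 2^31 bound: ValueError/OverflowError); A returns on no excluded input.
def Pre_qual_stat (qstr : List Int) : Prop := ∀ q ∈ qstr, 0 ≤ q ∧ q ≤ 1114111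
instance (qstr : List Int) : Decidable (Pre_qual_stat qstr) := by unfold Pre_qual_stat; infer_instance
def pvWitness_qual_stat : List Int := [53, 63, 33]

def Spec_qual_stat (qstr : List Int) (out : Int × Int) : Prop := out = qual_stat_alt qstr
instance (qstr : List Int) (out : Int × Int) : Decidable (Spec_qual_stat qstr out) := by unfold Spec_qual_stat; infer_instance

-- ===== CLAIM (what is proved, stated in full; the proofs are below) =====
def Claim_equal_qual_stat : Prop := ∀ (qstr : List Int), Dom_qual_stat qstr → Pre_qual_stat qstr → Spec_qual_stat qstr (qual_stat qstr)

-- ===== LEMMAS AND PROOFS =====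

-- A's loop counts, in each component, the elements passing the respective threshold.
lemma qual_stat_fold (l : List Int) (a b : Int) :
    l.foldl (fun s q =>
      let qual := q - 33
      if qual ≥ 30 then (s.1 + 1, s.2 + 1)
      else if qual ≥ 20 then (s.1 + 1, s.2)
      else s) (a, b)
    = (a + (l.countP (fun q => decide (20 ≤ q - 33)) : Int),
       b + (l.countP (fun q => decide (30 ≤ q - 33)) : Int)) := by
  induction l generalizing a b with
  | nil => simp
  | cons q t ih =>
    simp only [List.foldl_cons, List.countP_cons]
    by_cases h1 : (30:Int) ≤ q - 33
    · have h2 : (20:Int) ≤ q - 33 := by omega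
      rw [if_pos h1, ih]
      simp only [h1, h2, decide_true, if_true, Prod.mk.injEq]
      constructor <;> (try simp) <;> omega
    · rw [if_neg h1]
      by_cases h2 : (20:Int) ≤ q - 33
      · rw [if_pos h2, ih]
        simp only [h1, h2, decide_true, decide_false, if_true, if_false, Prod.mk.injEq]
        constructor <;> (try simp) <;> omega
      · rw [if_neg h2, ih]
        simp only [h1, h2, decide_false, if_false, Prod.mk.injEq]
        constructor <;> (try simp) <;> omega

-- B's loop over (value, multiplicity) pairs adds, in each component, the multiplicities
-- of the pairs passing the respective threshold.
lemma qual_stat_alt_fold (ps : List (Int × Int)) (a b : Int) :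
    ps.foldl (fun s vc =>
      let qual := vc.1 - 33
      let q20 := if qual ≥ 20 then s.1 + vc.2 else s.1
      let q30 := if qual ≥ 30 then s.2 + vc.2 else s.2
      (q20, q30)) (a, b)
    = (a + ((ps.filter (fun vc => decide (20 ≤ vc.1 - 33))).map (·.2)).sum,
       b + ((ps.filter (fun vc => decide (30 ≤ vc.1 - 33))).map (·.2)).sum) := by
  induction ps generalizing a b with
  | nil => simp
  | cons vc t ih =>
    simp only [List.foldl_cons, List.filter_cons]
    by_cases h2 : (30:Int) ≤ vc.1 - 33
    · have h1 : (20:Int) ≤ vc.1 - 33 := by omega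
      rw [ih]
      simp only [h1, h2, decide_true, if_true, List.map_cons, List.sum_cons, Prod.mk.injEq]
      constructor <;> (try simp) <;> omega
    · by_cases h1 : (20:Int) ≤ vc.1 - 33
      · rw [ih]
        simp only [h1, h2, decide_true, decide_false, if_true, if_false, List.map_cons,
          List.sum_cons, Prod.mk.injEq]
        constructor <;> (try simp) <;> omega
      · rw [ih]
        simp only [h1, h2, decide_false, if_false, Prod.mk.injEq]
        constructor <;> (try simp) <;> omega

lemma sum_map_natCast (S : List Int) (f : Int → Nat) :
    (S.map (fun k => ((f k : Nat) : Int))).sum = ((S.map f).sum : Int) := by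
  induction S with
  | nil => simp
  | cons x t ih => simp [ih]

-- Summing the multiplicities of the distinct values passing p gives the plain count.
lemma sum_counts_filter (l : List Int) (p : Int → Bool) :
    (((PySem.Set.ofList l).filter p).map (fun k => l.count k)).sum = l.countP p := by
  have hperm : (PySem.Set.ofList l).Perm l.dedup := by
    rw [List.perm_ext_iff_of_nodup (PySem.Set.nodup_ofList l) l.nodup_dedup]
    intro a
    rw [PySem.Set.mem_ofList, List.mem_dedup]
  calc (((PySem.Set.ofList l).filter p).map (fun k => l.count k)).sum
      = ((l.dedup.filter p).map (fun k => l.count k)).sum :=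
        ((hperm.filter p).map _).sum_eq
    _ = l.countP p := List.sum_map_count_dedup_filter_eq_countP p l

lemma qual_stat_alt_eq_counts (qstr : List Int) :
    qual_stat_alt qstr
    = ((qstr.countP (fun q => decide (20 ≤ q - 33)) : Int),
       (qstr.countP (fun q => decide (30 ≤ q - 33)) : Int)) := by
  have hc : qstr.foldl (fun d q => d.insert q (d.getD q 0 + 1)) PySem.Dict.empty
      = PySem.Dict.counter qstr := PySem.Dict.foldl_insert_getD_add_one_eq_counter qstr
  unfold qual_stat_alt
  rw [hc, qual_stat_alt_fold, PySem.Dict.items_counter]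
  rw [List.filter_map, List.filter_map, List.map_map, List.map_map]
  simp only [Function.comp_def]
  rw [sum_map_natCast, sum_map_natCast, sum_counts_filter, sum_counts_filter]
  simp

-- ===== VERDICT (by name: the statement is the Claim_ definition above) =====
theorem qual_stat_spec : Claim_equal_qual_stat := by
  intro qstr _ _
  unfold Spec_qual_stat
  rw [qual_stat_alt_eq_counts]
  unfold qual_stat
  rw [qual_stat_fold]
  simp
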